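-- pv_equiv track=rewrite | github.com/aslamovamir/LeetCode | detect_capital.py | detectCapitalUse
-- ===== SOURCE A (Python) =====
-- def detectCapitalUse(word: str) -> bool:
--     cap_start = False
--     more_cap = False
--     non_cap = False
--
--     for i in range(len(word)):
--         if i == 0 and word[i].isupper():
--             cap_start = True
--         else:
--             if word[i].isupper():
--                 if cap_start:
--                     more_cap = True
--                 else:
--                     return False
--             else:
--                 if cap_start and more_cap:
--                     # we know that we both found a cap at the start and somewhere else
--                     return False
--                 else:
--                     non_cap = True
--
--     if more_cap and non_cap:
--         return False
--     return True
-- ===== SOURCE B (Python) =====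
-- def detectCapitalUse(word: str) -> bool:
--     u = sum(c.isupper() for c in word)
--     if u == 0:
--         return True
--     return word[0].isupper() and (u == 1 or u == len(word))
-- ===== Notes on version B (the rewrite author's own statement) =====
-- stated objective: simpler
-- what changed: Replaces A's three-flag state machine with per-character early returns by a single uppercase count: valid iff no uppercase at all, or the first char is uppercase and the count is 1 or the length.
import Mathlib
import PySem

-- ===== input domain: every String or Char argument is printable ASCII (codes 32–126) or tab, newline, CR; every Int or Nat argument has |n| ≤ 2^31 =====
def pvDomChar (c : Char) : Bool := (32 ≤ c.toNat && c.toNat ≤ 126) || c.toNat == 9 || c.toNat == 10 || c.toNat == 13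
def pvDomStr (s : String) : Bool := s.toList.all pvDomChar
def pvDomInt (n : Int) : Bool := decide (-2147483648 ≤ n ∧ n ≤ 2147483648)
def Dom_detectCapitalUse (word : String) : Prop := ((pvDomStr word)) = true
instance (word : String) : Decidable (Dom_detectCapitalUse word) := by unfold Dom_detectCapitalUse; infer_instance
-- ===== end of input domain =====

-- B replaces A's three-flag state machine with early returns by one uppercase count
-- compared against 1 and the length (objective: simpler).

-- ===== PORT A =====
-- A's loop over range(len(word)) with the three flags; index only matters at i = 0,
-- so the head is handled first and the tail loop carries the flags (cs, mc, nc).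
-- Early 'return False' is the literal `false` in the matching branch.
def detectCapitalUseLoop : List Char → Bool → Bool → Bool → Bool
  | [], _, mc, nc => !(mc && nc)
  | c :: t, cs, mc, nc =>
    if PySem.Chars.isupper c then
      if cs then detectCapitalUseLoop t cs true nc
      else false
    else
      if cs && mc then false
      else detectCapitalUseLoop t cs mc true

def detectCapitalUse (word : String) : Bool :=
  match word.toList with
  | [] => true
  | c :: t =>
    -- i = 0: 'if i == 0 and word[i].isupper()' sets cap_start; otherwise the else
    -- branch runs with all flags still False and sets non_cap.
    if PySem.Chars.isupper c then detectCapitalUseLoop t true false false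
    else detectCapitalUseLoop t false false true

-- ===== PORT B =====
def detectCapitalUse_alt (word : String) : Bool :=
  let l := word.toList
  let u := l.countP PySem.Chars.isupper
  if u == 0 then true
  else
    (match l.head? with | some c => PySem.Chars.isupper c | none => false)
      && (u == 1 || u == l.length)

-- ===== PRECONDITION & SPEC =====
def Spec_detectCapitalUse (word : String) (out : Bool) : Prop := out = detectCapitalUse_alt word
instance (word : String) (out : Bool) : Decidable (Spec_detectCapitalUse word out) := by unfold Spec_detectCapitalUse; infer_instance

-- ===== CLAIM (what is proved, stated in full; the proofs are below) =====
def Claim_equal_detectCapitalUse : Prop := ∀ (word : String), Dom_detectCapitalUse word → Spec_detectCapitalUse word (detectCapitalUse word)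

-- ===== LEMMAS AND PROOFS =====

-- state (cap_start = false): any further uppercase returns False, so the loop
-- accepts exactly the all-lowercase tails
theorem loop_false (t : List Char) :
    detectCapitalUseLoop t false false true = (t.countP PySem.Chars.isupper == 0) := by
  induction t with
  | nil => simp [detectCapitalUseLoop]
  | cons c t ih =>
    by_cases h : PySem.Chars.isupper c = true <;>
      simp [detectCapitalUseLoop, h, ih]

-- state (cap_start, more_cap, non_cap all true): dead — every continuation is False
theorem loop_dead (t : List Char) :
    detectCapitalUseLoop t true true true = false := by
  induction t with
  | nil => simp [detectCapitalUseLoop]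
  | cons c t ih =>
    by_cases h : PySem.Chars.isupper c = true <;>
      simp [detectCapitalUseLoop, h, ih]

-- state (cap_start, more_cap): accepts exactly the all-uppercase tails
theorem loop_allcaps (t : List Char) :
    detectCapitalUseLoop t true true false = (t.countP PySem.Chars.isupper == t.length) := by
  induction t with
  | nil => simp [detectCapitalUseLoop]
  | cons c t ih =>
    have hle := List.countP_le_length (l := t) (p := PySem.Chars.isupper)
    by_cases h : PySem.Chars.isupper c = true <;>
      (simp [detectCapitalUseLoop, h, ih]; try omega)

-- state (cap_start, non_cap): accepts exactly the all-lowercase tails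
theorem loop_noncap (t : List Char) :
    detectCapitalUseLoop t true false true = (t.countP PySem.Chars.isupper == 0) := by
  induction t with
  | nil => simp [detectCapitalUseLoop]
  | cons c t ih =>
    by_cases h : PySem.Chars.isupper c = true <;>
      simp [detectCapitalUseLoop, h, ih, loop_dead]

-- state (cap_start only): accepts exactly all-lowercase or all-uppercase tails
theorem loop_capstart (t : List Char) :
    detectCapitalUseLoop t true false false =
      (t.countP PySem.Chars.isupper == 0 || t.countP PySem.Chars.isupper == t.length) := by
  induction t with
  | nil => simp [detectCapitalUseLoop]
  | cons c t ih =>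
    have hle := List.countP_le_length (l := t) (p := PySem.Chars.isupper)
    by_cases h : PySem.Chars.isupper c = true <;>
      (simp [detectCapitalUseLoop, h, loop_allcaps, loop_noncap]; try omega)

-- ===== VERDICT (by name: the statement is the Claim_ definition above) =====
theorem detectCapitalUse_spec : Claim_equal_detectCapitalUse := by
  intro word _
  unfold Spec_detectCapitalUse detectCapitalUse detectCapitalUse_alt
  rcases word.toList with _ | ⟨c, t⟩
  · simp
  · have hle := List.countP_le_length (l := t) (p := PySem.Chars.isupper)
    by_cases h : PySem.Chars.isupper c = true
    · simp [h, loop_capstart]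
    · simp [h, loop_false]
      rcases Nat.eq_zero_or_pos (List.countP PySem.Chars.isupper t) with hc | hc
      · have hall := List.countP_eq_zero.mp hc
        simp [hc]
        intro a ha
        simpa using hall a ha
      · have : ¬ (∀ a ∈ t, PySem.Chars.isupper a = false) := by
          intro hall
          have := List.countP_eq_zero.mpr (by simpa using hall)
          omega
        simp [Nat.pos_iff_ne_zero.mp hc, this]
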